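-- pv_equiv track=rewrite | github.com/commotum/arc-analysis | Composite/solos/319_ce602527_solo.py | downscale
-- ===== SOURCE A (Python) =====
-- from typing import Any, Callable, Container, FrozenSet, Tuple, Union, List, Iterable
--
-- Integer = int
--
-- Grid = Tuple[Tuple[Integer]]
--
-- def downscale(
--     grid: Grid,
--     factor: Integer
-- ) -> Grid:
--     """ downscale grid """
--     h, w = len(grid), len(grid[0])
--     downscaled_grid = tuple()
--     for i in range(h):
--         downscaled_row = tuple()
--         for j in range(w):
--             if j % factor == 0:
--                 downscaled_row = downscaled_row + (grid[i][j],)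
--         downscaled_grid = downscaled_grid + (downscaled_row, )
--     h = len(downscaled_grid)
--     downscaled_grid2 = tuple()
--     for i in range(h):
--         if i % factor == 0:
--             downscaled_grid2 = downscaled_grid2 + (downscaled_grid[i],)
--     return downscaled_grid2
-- ===== SOURCE B (Python) =====
-- from typing import Any, Callable, Container, FrozenSet, Tuple, Union, List, Iterable
--
-- Integer = int
--
-- Grid = Tuple[Tuple[Integer]]
--
-- def downscale(
--     grid: Grid,
--     factor: Integer
-- ) -> Grid:
--     """ downscale grid: single combined pass, only kept rows get their columns filtered """
--     h, w = len(grid), len(grid[0])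
--     return tuple(
--         tuple(grid[i][j] for j in range(w) if j % factor == 0)
--         for i in range(h) if i % factor == 0
--     )
-- ===== Notes on version B (the rewrite author's own statement) =====
-- stated objective: faster
-- what changed: Replaces A's two materialised passes (column-filter every row into an intermediate grid via repeated tuple re-concatenation, then row-filter that grid) by one nested comprehension that filters rows first and only column-filters the kept rows.
import Mathlib
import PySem

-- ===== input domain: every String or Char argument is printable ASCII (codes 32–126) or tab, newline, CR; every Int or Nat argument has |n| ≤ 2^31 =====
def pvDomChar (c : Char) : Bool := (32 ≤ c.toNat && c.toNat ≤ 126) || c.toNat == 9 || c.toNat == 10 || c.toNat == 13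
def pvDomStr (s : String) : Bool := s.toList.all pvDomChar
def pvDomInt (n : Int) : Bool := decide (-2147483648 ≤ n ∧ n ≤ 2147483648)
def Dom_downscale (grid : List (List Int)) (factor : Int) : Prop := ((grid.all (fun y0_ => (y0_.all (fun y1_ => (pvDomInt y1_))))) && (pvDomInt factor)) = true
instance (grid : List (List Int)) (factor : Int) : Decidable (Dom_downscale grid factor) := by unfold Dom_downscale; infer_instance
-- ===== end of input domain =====

-- B uses one nested comprehension (filter rows first, column-filter only kept rows)
-- instead of A's two materialised passes; return values are equal on all of Pre_.

-- ===== PORT A =====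
def downscale (grid : List (List Int)) (factor : Int) : List (List Int) :=
  let h : Nat := grid.length
  let w : Nat := (grid.headD []).length
  let dg : List (List Int) :=
    (PySem.List.pyRange 0 h 1).foldl (fun acc i =>
      let row : List Int :=
        (PySem.List.pyRange 0 w 1).foldl (fun r j =>
          if PySem.Int.mod j factor == 0 then
            r ++ [PySem.List.pyGetD (PySem.List.pyGetD grid i []) j 0]
          else r) []
      acc ++ [row]) []
  let h2 : Nat := dg.length
  (PySem.List.pyRange 0 h2 1).foldl (fun acc i =>
    if PySem.Int.mod i factor == 0 then acc ++ [PySem.List.pyGetD dg i []] else acc) []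

-- ===== PORT B =====
def downscale_alt (grid : List (List Int)) (factor : Int) : List (List Int) :=
  let h : Nat := grid.length
  let w : Nat := (grid.headD []).length
  ((PySem.List.pyRange 0 h 1).filter (fun i => PySem.Int.mod i factor == 0)).map
    (fun i =>
      ((PySem.List.pyRange 0 w 1).filter (fun j => PySem.Int.mod j factor == 0)).map
        (fun j => PySem.List.pyGetD (PySem.List.pyGetD grid i []) j 0))

-- ===== PRECONDITION & SPEC =====
-- Pre_ excludes exactly the inputs where Python A raises: factor = 0 (ZeroDivisionError),
-- the empty grid (IndexError on grid[0]), and ragged grids where some row lacks a kept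
-- column index j < len(grid[0]) (IndexError on grid[i][j]).
def Pre_downscale (grid : List (List Int)) (factor : Int) : Prop :=
  factor ≠ 0 ∧ grid ≠ [] ∧
  ∀ r ∈ grid, ∀ j ∈ PySem.List.pyRange 0 ((grid.headD []).length : Int) 1,
    PySem.Int.mod j factor = 0 → j < (r.length : Int)
instance (grid : List (List Int)) (factor : Int) : Decidable (Pre_downscale grid factor) := by
  unfold Pre_downscale; infer_instance
def pvWitness_downscale : List (List Int) × Int := ([[1, 2, 3], [4, 5, 6], [7, 8, 9]], 2)

def Spec_downscale (grid : List (List Int)) (factor : Int) (out : List (List Int)) : Prop := out = downscale_alt grid factor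
instance (grid : List (List Int)) (factor : Int) (out : List (List Int)) : Decidable (Spec_downscale grid factor out) := by unfold Spec_downscale; infer_instance

-- ===== CLAIM (what is proved, stated in full; the proofs are below) =====
def Claim_equal_downscale : Prop := ∀ (grid : List (List Int)) (factor : Int), Dom_downscale grid factor → Pre_downscale grid factor → Spec_downscale grid factor (downscale grid factor)

-- ===== LEMMAS AND PROOFS =====

theorem downscale_eq_alt (grid : List (List Int)) (factor : Int) :
    downscale grid factor = downscale_alt grid factor := by
  simp only [downscale, downscale_alt, PySem.List.foldl_append_if,
    PySem.List.foldl_append_singleton_eq_map, List.nil_append, List.length_map,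
    PySem.List.length_pyRange_one]
  apply List.map_congr_left
  intro i hi
  have hi' := PySem.List.mem_pyRange_one.mp (List.mem_of_mem_filter hi)
  rw [PySem.List.pyGetD_map_pyRange_of_nonneg _ _ _ _ hi'.1 (by simpa using hi'.2)]

-- ===== VERDICT (by name: the statement is the Claim_ definition above) =====
theorem downscale_spec : Claim_equal_downscale := by
  intro grid factor _ _
  exact downscale_eq_alt grid factor
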